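-- pv_equiv track=rewrite | github.com/gcifuentess/holbertonschool-interview | 0x03-minimum_operations/0-minoperations.py | optimal_divisor
-- ===== SOURCE A (Python) =====
-- def optimal_divisor(n):
--     '''Finds out optimal divisor of a positive integer'''
--     i = n - 1
--     divisors = [n + 1]
--     while i > 1:
--         if n % i == 0:
--             n = i
--             i = n - 1
--             divisors.append(n)
--         else:
--             i -= 1
--     return divisors
-- ===== SOURCE B (Python) =====
-- def optimal_divisor(n):
--     '''Finds out optimal divisor of a positive integer'''
--     divisors = [n + 1]
--     while True:
--         f = 2
--         while f * f <= n and n % f != 0: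
--             f += 1
--         if f * f > n:
--             break
--         n //= f
--         divisors.append(n)
--     return divisors
-- ===== Notes on version B (the rewrite author's own statement) =====
-- stated objective: faster
-- what changed: Instead of scanning downward from n-1 for the largest proper divisor (O(n) per step), B finds the smallest prime factor by trial division up to sqrt(n) and appends n//spf, which is the same largest proper divisor.
import Mathlib
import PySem

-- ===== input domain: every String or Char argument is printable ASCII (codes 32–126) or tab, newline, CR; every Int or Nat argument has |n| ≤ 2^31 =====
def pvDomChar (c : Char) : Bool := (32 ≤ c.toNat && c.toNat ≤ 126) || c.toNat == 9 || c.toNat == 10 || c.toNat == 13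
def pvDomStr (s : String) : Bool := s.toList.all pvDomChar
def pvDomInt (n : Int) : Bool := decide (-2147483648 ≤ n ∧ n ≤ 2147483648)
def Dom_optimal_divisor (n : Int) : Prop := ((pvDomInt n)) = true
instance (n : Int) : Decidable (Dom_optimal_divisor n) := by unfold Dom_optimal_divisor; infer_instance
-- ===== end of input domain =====

-- B finds each successor as n // (smallest prime factor) via trial division to √n instead of
-- scanning downward from n-1 for the largest proper divisor; same values, asymptotically faster.

-- ===== PORT A =====
-- the while loop of A: state (n, i, divisors); i strictly decreases each iteration
def pvLoopA (n i : Int) (divisors : List Int) : List Int :=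
  if _h : 1 < i then
    if PySem.Int.mod n i = 0 then
      pvLoopA i (i - 1) (divisors ++ [i])
    else
      pvLoopA n (i - 1) divisors
  else divisors
termination_by i.toNat
decreasing_by all_goals omega

def optimal_divisor (n : Int) : List Int :=
  pvLoopA n (n - 1) [n + 1]

-- ===== PORT B =====
-- inner while loop of B: f += 1 while f*f <= n and n % f != 0 (the '2 ≤ f' conjunct only
-- makes the recursion total; B always starts at f = 2 and f only grows)
def pvSpf (n f : Int) : Int :=
  if _h : 2 ≤ f ∧ f * f ≤ n ∧ PySem.Int.mod n f ≠ 0 then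
    pvSpf n (f + 1)
  else f
termination_by (n - f).toNat
decreasing_by
  have : f < n := by nlinarith [_h.1, _h.2.1]
  omega


-- facts about pvSpf cited by pvLoopB's termination proof
theorem pvSpf_ge (n f : Int) : f ≤ pvSpf n f := by
  rw [pvSpf]; split_ifs with h
  · have ih := pvSpf_ge n (f + 1); omega
  · exact le_refl f
termination_by (n - f).toNat
decreasing_by
  have : f < n := by nlinarith [h.1, h.2.1]
  omega

-- outer while loop of B: state (n, divisors); n strictly decreases when it recurses
def pvLoopB (n : Int) (divisors : List Int) : List Int :=
  let f := pvSpf n 2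
  if _h : f * f ≤ n then
    pvLoopB (PySem.Int.floordiv n f) (divisors ++ [PySem.Int.floordiv n f])
  else divisors
termination_by n.toNat
decreasing_by
  have h2 : 2 ≤ pvSpf n 2 := pvSpf_ge n 2
  have hn4 : (4:Int) ≤ n := by nlinarith
  have := PySem.Int.floordiv_lt_iff_lt_mul (a := n) (b := pvSpf n 2) (q := n) (by omega)
  have hlt : PySem.Int.floordiv n (pvSpf n 2) < n := by
    rw [this]; nlinarith
  omega

def optimal_divisor_alt (n : Int) : List Int :=
  pvLoopB n [n + 1]

-- ===== PRECONDITION & SPEC =====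
def Spec_optimal_divisor (n : Int) (out : List Int) : Prop := out = optimal_divisor_alt n
instance (n : Int) (out : List Int) : Decidable (Spec_optimal_divisor n out) := by unfold Spec_optimal_divisor; infer_instance

-- ===== CLAIM (what is proved, stated in full; the proofs are below) =====
def Claim_equal_optimal_divisor : Prop := ∀ (n : Int), Dom_optimal_divisor n → Spec_optimal_divisor n (optimal_divisor n)

-- ===== LEMMAS AND PROOFS =====

theorem pvSpf_dvd (n f : Int) (h2 : 2 ≤ f)
    (hle : pvSpf n f * pvSpf n f ≤ n) : PySem.Int.mod n (pvSpf n f) = 0 := by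
  rw [pvSpf] at hle ⊢; split_ifs at hle ⊢ with h
  · exact pvSpf_dvd n (f + 1) (by omega) hle
  · by_contra hne; exact h ⟨h2, hle, hne⟩
termination_by (n - f).toNat
decreasing_by
  have : f < n := by nlinarith [h.1, h.2.1]
  omega

theorem pvSpf_min (n f : Int) (m : Int) (h1 : f ≤ m) (h2 : m < pvSpf n f) :
    m * m ≤ n ∧ PySem.Int.mod n m ≠ 0 := by
  by_cases h : 2 ≤ f ∧ f * f ≤ n ∧ PySem.Int.mod n f ≠ 0
  · rw [pvSpf, dif_pos h] at h2
    rcases (by omega : m = f ∨ f + 1 ≤ m) with he | hlt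
    · subst he; exact ⟨h.2.1, h.2.2⟩
    · exact pvSpf_min n (f + 1) m hlt h2
  · rw [pvSpf, dif_neg h] at h2; omega
termination_by (n - f).toNat
decreasing_by
  have : f < n := by nlinarith [h.1, h.2.1]
  omega


-- A's scan finds nothing: no k in (1, j] divides n
theorem loopA_none (n j : Int) (acc : List Int)
    (h : ∀ k, 1 < k → k ≤ j → PySem.Int.mod n k ≠ 0) : pvLoopA n j acc = acc := by
  rw [pvLoopA]; split_ifs with h1 h2
  · exact absurd h2 (h j h1 le_rfl)
  · exact loopA_none n (j - 1) acc (fun k hk1 hk2 => h k hk1 (by omega))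
  · rfl
termination_by j.toNat

-- A's scan from j down first hits d, the largest divisor of n in (1, j]
theorem loopA_step (n d j : Int) (acc : List Int) (hd1 : 1 < d) (hdj : d ≤ j)
    (hdvd : PySem.Int.mod n d = 0)
    (hmax : ∀ k, d < k → k ≤ j → PySem.Int.mod n k ≠ 0) :
    pvLoopA n j acc = pvLoopA d (d - 1) (acc ++ [d]) := by
  rw [pvLoopA]; split_ifs with h1 h2
  · have : j = d := by
      by_contra hne
      exact hmax j (by omega) le_rfl h2
    subst this; rfl
  · have : j ≠ d := fun he => h2 (he ▸ hdvd)
    exact loopA_step n d (j - 1) acc hd1 (by omega)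
      hdvd (fun k hk1 hk2 => hmax k hk1 (by omega))
  · omega
termination_by (j - d).toNat
decreasing_by omega

-- any divisor k of n with 1 < k < n forces a divisor m with 2 ≤ m and m * m ≤ n
theorem small_factor (n k : Int) (h1 : 1 < k) (h2 : k ≤ n - 1) (hk : k ∣ n) :
    ∃ m, 2 ≤ m ∧ m * m ≤ n ∧ m ∣ n := by
  obtain ⟨c, hc⟩ := hk
  have hn : 2 < n := by omega
  have hc1 : 1 ≤ c := by nlinarith
  have hc2 : 2 ≤ c := by
    by_contra h
    have he : c = 1 := by omega
    rw [he, mul_one] at hc; omega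
  rcases le_total k c with h | h
  · exact ⟨k, by omega, by nlinarith, ⟨c, hc⟩⟩
  · exact ⟨c, hc2, by nlinarith, ⟨k, by rw [hc]; ring⟩⟩

-- the heart: A's downward scan and B's spf step produce the same list
theorem main_eq : ∀ (N : Nat) (n : Int) (acc : List Int), n.toNat ≤ N →
    pvLoopA n (n - 1) acc = pvLoopB n acc := by
  intro N
  induction N with
  | zero =>
      intro n acc hn
      have hn0 : n ≤ 0 := by omega
      rw [pvLoopB]
      have hs : ¬ (pvSpf n 2 * pvSpf n 2 ≤ n) := by
        have := pvSpf_ge n 2; nlinarith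
      rw [dif_neg hs]
      exact loopA_none n (n - 1) acc (fun k hk1 hk2 => by omega)
  | succ N ih =>
      intro n acc hn
      by_cases hs : pvSpf n 2 * pvSpf n 2 ≤ n
      · -- composite step
        have h2s : 2 ≤ pvSpf n 2 := pvSpf_ge n 2
        have hmod : PySem.Int.mod n (pvSpf n 2) = 0 := pvSpf_dvd n 2 (by norm_num) hs
        have hdvd : pvSpf n 2 ∣ n := (PySem.Int.mod_eq_zero_iff_dvd n (pvSpf n 2)).1 hmod
        obtain ⟨d, hd⟩ := hdvd
        have hn4 : 4 ≤ n := by nlinarith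
        have hds : pvSpf n 2 ≤ d := by nlinarith
        have hd2 : 2 ≤ d := by omega
        have hdn : d ≤ n - 1 := by nlinarith
        have hfd : PySem.Int.floordiv n (pvSpf n 2) = d := by
          have hcan : pvSpf n 2 * d / pvSpf n 2 = d :=
            Int.mul_ediv_cancel_left d (by omega)
          rw [PySem.Int.floordiv_eq_ediv_of_pos (by omega), ← hcan, ← hd]
        have hmodd : PySem.Int.mod n d = 0 :=
          (PySem.Int.mod_eq_zero_iff_dvd n d).2 ⟨pvSpf n 2, by linarith [hd, mul_comm (pvSpf n 2) d]⟩
        have hmax : ∀ k, d < k → k ≤ n - 1 → PySem.Int.mod n k ≠ 0 := by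
          intro k hk1 hk2 hmk
          obtain ⟨c, hc⟩ := (PySem.Int.mod_eq_zero_iff_dvd n k).1 hmk
          have hc1 : 1 ≤ c := by nlinarith
          have hc2 : 2 ≤ c := by
            rcases (by omega : c = 1 ∨ 2 ≤ c) with h | h
            · exfalso; rw [h, mul_one] at hc; omega
            · exact h
          have hcs : c < pvSpf n 2 := by nlinarith
          have := pvSpf_min n 2 c (by omega) hcs
          exact this.2 ((PySem.Int.mod_eq_zero_iff_dvd n c).2 ⟨k, by linarith [hc, mul_comm k c]⟩)
        rw [loopA_step n d (n - 1) acc (by omega) hdn hmodd hmax]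
        rw [ih d (acc ++ [d]) (by omega)]
        conv_rhs => rw [pvLoopB]
        simp only [dif_pos hs, hfd]
      · -- n has no divisor in (1, n-1]: both return acc
        rw [pvLoopB, dif_neg hs]
        refine loopA_none n (n - 1) acc (fun k hk1 hk2 hmk => ?_)
        have hk : k ∣ n := (PySem.Int.mod_eq_zero_iff_dvd n k).1 hmk
        obtain ⟨m, hm2, hmm, hmd⟩ := small_factor n k hk1 hk2 hk
        have hms : m < pvSpf n 2 := by nlinarith [pvSpf_ge n 2]
        have := pvSpf_min n 2 m hm2 hms
        exact this.2 ((PySem.Int.mod_eq_zero_iff_dvd n m).2 hmd)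

-- ===== VERDICT (by name: the statement is the Claim_ definition above) =====
theorem optimal_divisor_spec : Claim_equal_optimal_divisor := by
  intro n _
  unfold Spec_optimal_divisor optimal_divisor optimal_divisor_alt
  exact main_eq n.toNat n [n + 1] le_rfl
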